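-- pv_equiv track=rewrite | github.com/jonasxyz/bsync | Proof of Concept/compareHarSQLite3.py | get_additional_urls
-- ===== SOURCE A (Python) =====
-- def get_additional_urls(file1_visited_urls, file2_visited_urls):
--     additional_urls = []
--     file2_visited_urls_copy = file2_visited_urls.copy()  # Create a copy to avoid modifying the original list
--     for url in file1_visited_urls:
--         if url in file2_visited_urls_copy:
--             file2_visited_urls_copy.remove(url)  # Remove the URL from the copy
--         else:
--             additional_urls.append(url)  # Add the URL to the additional_urls list
--     return additional_urls
-- ===== SOURCE B (Python) =====
-- def get_additional_urls(file1_visited_urls, file2_visited_urls):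
--     counts2 = {}
--     for url in file2_visited_urls:
--         counts2[url] = counts2.get(url, 0) + 1
--     additional_urls = []
--     seen = {}
--     for url in file1_visited_urls:
--         c = seen.get(url, 0) + 1
--         seen[url] = c
--         if c > counts2.get(url, 0):
--             additional_urls.append(url)
--     return additional_urls
-- ===== Notes on version B (the rewrite author's own statement) =====
-- stated objective: faster
-- what changed: Replaces A's per-element list membership test and list.remove scan over a mutated copy of file2 with a pre-built count dictionary of file2 plus a single pass over file1 maintaining running seen-counts, appending a url exactly when its running count exceeds its file2 count.
import Mathlib
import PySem

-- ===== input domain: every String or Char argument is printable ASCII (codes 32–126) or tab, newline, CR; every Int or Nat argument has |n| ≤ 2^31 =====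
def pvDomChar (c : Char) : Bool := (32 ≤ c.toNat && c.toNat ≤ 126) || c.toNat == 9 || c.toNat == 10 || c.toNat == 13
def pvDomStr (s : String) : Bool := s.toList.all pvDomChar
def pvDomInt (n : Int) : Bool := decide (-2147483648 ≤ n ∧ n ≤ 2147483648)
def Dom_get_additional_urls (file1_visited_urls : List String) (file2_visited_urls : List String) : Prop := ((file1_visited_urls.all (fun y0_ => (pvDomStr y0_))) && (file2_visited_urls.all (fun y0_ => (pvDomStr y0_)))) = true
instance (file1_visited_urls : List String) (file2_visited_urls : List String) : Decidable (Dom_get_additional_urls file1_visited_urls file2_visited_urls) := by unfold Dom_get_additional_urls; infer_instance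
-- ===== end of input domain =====

-- B replaces A's repeated list-membership + list.remove scans with one count
-- dictionary of file2 and a single running-count pass over file1 (objective: faster).

-- ===== PORT A =====
def get_additional_urls (file1_visited_urls : List String) (file2_visited_urls : List String) : List String :=
  (file1_visited_urls.foldl
    (fun (st : List String × List String) url =>
      if url ∈ st.2 then
        (st.1, (PySem.List.remove? st.2 url).getD st.2)
      else
        (st.1 ++ [url], st.2))
    ([], file2_visited_urls)).1

-- ===== PORT B =====
def get_additional_urls_alt (file1_visited_urls : List String) (file2_visited_urls : List String) : List String :=
  let counts2 : PySem.Dict String Int :=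
    file2_visited_urls.foldl (fun d url => d.insert url (d.getD url 0 + 1)) PySem.Dict.empty
  (file1_visited_urls.foldl
    (fun (st : List String × PySem.Dict String Int) url =>
      let c := st.2.getD url 0 + 1
      let seen := st.2.insert url c
      if c > counts2.getD url 0 then (st.1 ++ [url], seen) else (st.1, seen))
    ([], PySem.Dict.empty)).1

-- ===== PRECONDITION & SPEC =====
def Spec_get_additional_urls (file1_visited_urls : List String) (file2_visited_urls : List String) (out : List String) : Prop := out = get_additional_urls_alt file1_visited_urls file2_visited_urls
instance (file1_visited_urls : List String) (file2_visited_urls : List String) (out : List String) : Decidable (Spec_get_additional_urls file1_visited_urls file2_visited_urls out) := by unfold Spec_get_additional_urls; infer_instance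

-- ===== CLAIM (what is proved, stated in full; the proofs are below) =====
def Claim_equal_get_additional_urls : Prop := ∀ (file1_visited_urls : List String) (file2_visited_urls : List String), Dom_get_additional_urls file1_visited_urls file2_visited_urls → Spec_get_additional_urls file1_visited_urls file2_visited_urls (get_additional_urls file1_visited_urls file2_visited_urls)

-- ===== LEMMAS AND PROOFS =====

-- Loop correspondence: if the remaining multiset `copy` on A's side carries, for every
-- url u, exactly max(cnt(u) - seen(u), 0) occurrences, then A's loop and B's loop
-- produce the same accumulator.
theorem pv_loops_agree (cnt : PySem.Dict String Int) (f1 : List String) :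
    ∀ (acc copy : List String) (seen : PySem.Dict String Int),
      (∀ u, (copy.count u : Int) = max (cnt.getD u 0 - seen.getD u 0) 0) →
      (f1.foldl
        (fun (st : List String × List String) url =>
          if url ∈ st.2 then
            (st.1, (PySem.List.remove? st.2 url).getD st.2)
          else
            (st.1 ++ [url], st.2))
        (acc, copy)).1
      =
      (f1.foldl
        (fun (st : List String × PySem.Dict String Int) url =>
          let c := st.2.getD url 0 + 1
          let seen := st.2.insert url c
          if c > cnt.getD url 0 then (st.1 ++ [url], seen) else (st.1, seen))
        (acc, seen)).1 := by
  induction f1 with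
  | nil => intro acc copy seen _; rfl
  | cons url t ih =>
    intro acc copy seen hinv
    have hurl := hinv url
    simp only [List.foldl_cons]
    by_cases hm : url ∈ copy
    · have hpos : 0 < copy.count url := List.count_pos_iff.mpr hm
      have hlt : seen.getD url 0 < cnt.getD url 0 := by omega
      rw [PySem.List.remove?_eq_some_erase copy url hm]
      have hB : ¬ (seen.getD url 0 + 1 > cnt.getD url 0) := by omega
      simp only [hm, if_pos, Option.getD_some, hB, if_neg, not_false_iff]
      apply ih
      intro u
      have hu := hinv u
      rw [PySem.Dict.getD_insert]
      by_cases he : u = url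
      · subst he
        rw [List.count_erase_self, if_pos rfl]
        omega
      · have : List.count u (copy.erase url) = List.count u copy := by
          simp [List.count_erase, Ne.symm he]
        rw [this, if_neg he]
        exact hu
    · have hz : copy.count url = 0 := by
        by_contra h0
        exact hm (List.count_pos_iff.mp (Nat.pos_of_ne_zero h0))
      have hge : cnt.getD url 0 ≤ seen.getD url 0 := by
        rw [hz] at hurl; omega
      have hB : seen.getD url 0 + 1 > cnt.getD url 0 := by omega
      simp only [hm, if_neg, not_false_iff, hB, if_pos]
      apply ih
      intro u
      have hu := hinv u
      rw [PySem.Dict.getD_insert]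
      by_cases he : u = url
      · subst he
        rw [if_pos rfl, hz] at *
        omega
      · rw [if_neg he]; exact hu

-- ===== VERDICT (by name: the statement is the Claim_ definition above) =====
theorem get_additional_urls_spec : Claim_equal_get_additional_urls := by
  intro f1 f2 _
  unfold Spec_get_additional_urls get_additional_urls get_additional_urls_alt
  rw [PySem.Dict.foldl_insert_getD_add_one_eq_counter]
  apply pv_loops_agree
  intro u
  rw [PySem.Dict.getD_counter, PySem.Dict.getD_empty]
  omega
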